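-- pv_equiv track=rewrite | github.com/ritikmalik-cmd/Marketing-Dashboard | full_dashboard.py | get_lead_statuses
-- ===== SOURCE A (Python) =====
-- def get_lead_statuses(leads):
--     """Get unique lead statuses from CRM data, including 'Not Set' for leads without status"""
--     statuses = set()
--     has_empty_status = False
--
--     for lead in leads:
--         status = lead.get('Lead_Status')
--         if status:
--             statuses.add(status)
--         else:
--             has_empty_status = True
--
--     # Add "Not Set" if there are leads without status
--     if has_empty_status:
--         statuses.add('Not Set')
--
--     return sorted(list(statuses))
-- ===== SOURCE B (Python) =====
-- def get_lead_statuses(leads):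
--     """Get unique lead statuses from CRM data, including 'Not Set' for leads without status"""
--     vals = sorted((lead.get('Lead_Status') or 'Not Set') for lead in leads)
--     out = []
--     for v in vals:
--         if not out or out[-1] != v:
--             out.append(v)
--     return out
-- ===== Notes on version B (the rewrite author's own statement) =====
-- stated objective: alternative
-- what changed: Replaces A's set accumulation plus empty-status flag plus final sort with a sort-then-scan algorithm: normalize every lead to its status (or 'Not Set'), sort the multiset of values, then collapse adjacent duplicate runs in one linear scan; no set is ever built.
import Mathlib
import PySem

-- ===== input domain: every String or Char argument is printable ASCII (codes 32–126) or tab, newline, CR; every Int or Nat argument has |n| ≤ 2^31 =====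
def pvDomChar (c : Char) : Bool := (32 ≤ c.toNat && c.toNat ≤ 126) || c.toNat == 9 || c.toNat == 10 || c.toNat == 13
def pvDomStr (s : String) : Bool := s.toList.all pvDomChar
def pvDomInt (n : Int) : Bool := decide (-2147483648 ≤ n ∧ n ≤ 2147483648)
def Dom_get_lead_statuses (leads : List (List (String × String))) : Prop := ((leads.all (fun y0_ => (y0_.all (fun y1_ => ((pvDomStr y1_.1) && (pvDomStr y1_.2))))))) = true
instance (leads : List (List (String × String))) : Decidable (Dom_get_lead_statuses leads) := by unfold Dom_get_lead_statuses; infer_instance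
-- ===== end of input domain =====

-- B replaces A's set + empty-status flag + final sort by sort-then-scan: normalize
-- each lead, sort the multiset of values, collapse adjacent duplicate runs
-- (objective: alternative algorithm, no set is built).

-- ===== PORT A =====
-- the loop body of A: add a truthy status to the set, otherwise raise the flag
def pvStepA (acc : PySem.Set String × Bool) (lead : List (String × String)) :
    PySem.Set String × Bool :=
  match (PySem.Dict.mk lead).get? "Lead_Status" with
  | some s => if s ≠ "" then (PySem.Set.add acc.1 s, acc.2) else (acc.1, true)
  | none => (acc.1, true)

def get_lead_statuses (leads : List (List (String × String))) : List String :=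
  let r := leads.foldl pvStepA (PySem.Set.empty, false)
  let statuses := if r.2 then PySem.Set.add r.1 "Not Set" else r.1
  PySem.List.sorted statuses (fun x => x) false

-- ===== PORT B =====
-- lead.get('Lead_Status') or 'Not Set'
def pvNorm (lead : List (String × String)) : String :=
  match (PySem.Dict.mk lead).get? "Lead_Status" with
  | some s => if s = "" then "Not Set" else s
  | none => "Not Set"

-- B's loop body: append v unless the output is nonempty and already ends with v
def pvDedupStep (out : List String) (v : String) : List String :=
  if out = [] || out.getLast? != some v then out ++ [v] else out

def get_lead_statuses_alt (leads : List (List (String × String))) : List String :=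
  let vals := PySem.List.sorted (leads.map pvNorm) (fun x => x) false
  vals.foldl pvDedupStep []

-- ===== PRECONDITION & SPEC =====
def Spec_get_lead_statuses (leads : List (List (String × String))) (out : List String) : Prop := out = get_lead_statuses_alt leads
instance (leads : List (List (String × String))) (out : List String) : Decidable (Spec_get_lead_statuses leads out) := by unfold Spec_get_lead_statuses; infer_instance

-- ===== CLAIM (what is proved, stated in full; the proofs are below) =====
def Claim_equal_get_lead_statuses : Prop := ∀ (leads : List (List (String × String))), Dom_get_lead_statuses leads → Spec_get_lead_statuses leads (get_lead_statuses leads)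

-- ===== LEMMAS AND PROOFS =====

theorem pvNorm_none (l : List (String × String))
    (h : (PySem.Dict.mk l).get? "Lead_Status" = none) : pvNorm l = "Not Set" := by
  unfold pvNorm; rw [h]

theorem pvNorm_some (l : List (String × String)) (s : String)
    (h : (PySem.Dict.mk l).get? "Lead_Status" = some s) :
    pvNorm l = if s = "" then "Not Set" else s := by
  unfold pvNorm; rw [h]

-- membership in the set component of A's fold
theorem memA (x : String) (leads : List (List (String × String)))
    (acc : PySem.Set String × Bool) :
    x ∈ (leads.foldl pvStepA acc).1 ↔
      x ∈ acc.1 ∨ ∃ l ∈ leads,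
        (PySem.Dict.mk l).get? "Lead_Status" = some x ∧ x ≠ "" := by
  induction leads generalizing acc with
  | nil => simp
  | cons hd tl ih =>
    simp only [List.foldl_cons, ih, List.mem_cons]
    unfold pvStepA
    cases h : (PySem.Dict.mk hd).get? "Lead_Status" with
    | none =>
      constructor
      · rintro (hx | ⟨l, hl, hg, hne⟩)
        · exact Or.inl hx
        · exact Or.inr ⟨l, Or.inr hl, hg, hne⟩
      · rintro (hx | ⟨l, hl', hg, hne⟩)
        · exact Or.inl hx
        · rcases hl' with rfl | hl
          · rw [h] at hg; cases hg
          · exact Or.inr ⟨l, hl, hg, hne⟩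
    | some s =>
      by_cases hs : s = ""
      · simp only [hs, ne_eq, not_true_eq_false, if_false]
        constructor
        · rintro (hx | ⟨l, hl, hg, hne⟩)
          · exact Or.inl hx
          · exact Or.inr ⟨l, Or.inr hl, hg, hne⟩
        · rintro (hx | ⟨l, hl', hg, hne⟩)
          · exact Or.inl hx
          · rcases hl' with rfl | hl
            · rw [h] at hg
              exact (hne ((Option.some.inj hg).symm.trans hs)).elim
            · exact Or.inr ⟨l, hl, hg, hne⟩
      · simp only [ne_eq, hs, not_false_eq_true, if_true]
        rw [show x ∈ PySem.Set.add acc.1 s ↔ x ∈ acc.1 ∨ x = s from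
          PySem.Set.mem_add _ _ _]
        constructor
        · rintro ((hx | rfl) | ⟨l, hl, hg, hne⟩)
          · exact Or.inl hx
          · exact Or.inr ⟨hd, Or.inl rfl, h, hs⟩
          · exact Or.inr ⟨l, Or.inr hl, hg, hne⟩
        · rintro (hx | ⟨l, hl', hg, hne⟩)
          · exact Or.inl (Or.inl hx)
          · rcases hl' with rfl | hl
            · rw [h] at hg
              exact Or.inl (Or.inr (Option.some.inj hg).symm)
            · exact Or.inr ⟨l, hl, hg, hne⟩

-- the flag component of A's fold
theorem flagA (leads : List (List (String × String))) (acc : PySem.Set String × Bool) :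
    (leads.foldl pvStepA acc).2 =
      (acc.2 || leads.any (fun l =>
        match (PySem.Dict.mk l).get? "Lead_Status" with
        | some s => s == ""
        | none => true)) := by
  induction leads generalizing acc with
  | nil => simp
  | cons hd tl ih =>
    simp only [List.foldl_cons, List.any_cons, ih]
    unfold pvStepA
    cases h : (PySem.Dict.mk hd).get? "Lead_Status" with
    | none => simp
    | some s =>
      by_cases hs : s = ""
      · simp [hs]
      · have hb : (s == "") = false := beq_eq_false_iff_ne.2 hs
        simp [hs, hb]

-- each loop step of A keeps the set duplicate-free
theorem nodup_step (acc : PySem.Set String × Bool) (lead : List (String × String))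
    (h : acc.1.Nodup) : (pvStepA acc lead).1.Nodup := by
  unfold pvStepA
  cases (PySem.Dict.mk lead).get? "Lead_Status" with
  | none => exact h
  | some s =>
    by_cases hs : s = ""
    · simp only [hs, ne_eq, not_true_eq_false, if_false]; exact h
    · simp only [ne_eq, hs, not_false_eq_true, if_true]
      exact PySem.Set.nodup_add _ _ h

theorem nodupA (leads : List (List (String × String))) (acc : PySem.Set String × Bool)
    (h : acc.1.Nodup) : (leads.foldl pvStepA acc).1.Nodup := by
  induction leads generalizing acc with
  | nil => exact h
  | cons hd tl ih => exact ih _ (nodup_step _ _ h)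

-- A's final set is a permutation of the deduplicated normalized values
theorem final_perm (leads : List (List (String × String))) :
    (if (leads.foldl pvStepA (PySem.Set.empty, false)).2 then
        PySem.Set.add (leads.foldl pvStepA (PySem.Set.empty, false)).1 "Not Set"
      else (leads.foldl pvStepA (PySem.Set.empty, false)).1).Perm
      (PySem.Set.ofList (leads.map pvNorm)) := by
  set r := leads.foldl pvStepA (PySem.Set.empty, false) with hr
  have hnodupL : (if r.2 then PySem.Set.add r.1 "Not Set" else r.1).Nodup := by
    have h1 : r.1.Nodup := nodupA leads _ List.nodup_nil
    split
    · exact PySem.Set.nodup_add _ _ h1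
    · exact h1
  refine (List.perm_ext_iff_of_nodup hnodupL (PySem.Set.nodup_ofList _)).2 fun x => ?_
  have hm := memA x leads (PySem.Set.empty, false)
  have hf := flagA leads (PySem.Set.empty, false)
  simp only [PySem.Set.mem_ofList, List.mem_map]
  constructor
  · intro hx
    by_cases hflag : r.2 = true
    · rw [if_pos hflag] at hx
      rcases (PySem.Set.mem_add _ _ _).1 hx with hx | hx
      · rcases hm.1 hx with h0 | ⟨l, hl, hg, hne⟩
        · simp [PySem.Set.empty] at h0
        · exact ⟨l, hl, by rw [pvNorm_some l x hg, if_neg hne]⟩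
      · subst hx
        rw [hf] at hflag
        simp only [Bool.false_or, List.any_eq_true] at hflag
        obtain ⟨l, hl, hcond⟩ := hflag
        refine ⟨l, hl, ?_⟩
        cases h : (PySem.Dict.mk l).get? "Lead_Status" with
        | none => exact pvNorm_none l h
        | some s =>
          rw [h] at hcond
          have hs : s = "" := by simpa using hcond
          rw [pvNorm_some l s h, if_pos hs]
    · rw [if_neg hflag] at hx
      rcases hm.1 hx with h0 | ⟨l, hl, hg, hne⟩
      · simp [PySem.Set.empty] at h0
      · exact ⟨l, hl, by rw [pvNorm_some l x hg, if_neg hne]⟩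
  · rintro ⟨l, hl, hnorm⟩
    cases h : (PySem.Dict.mk l).get? "Lead_Status" with
    | none =>
      have hflag : r.2 = true := by
        rw [hf]
        simp only [Bool.false_or, List.any_eq_true]
        exact ⟨l, hl, by rw [h]⟩
      rw [if_pos hflag]
      refine (PySem.Set.mem_add _ _ _).2 (Or.inr ?_)
      rw [← hnorm, pvNorm_none l h]
    | some s =>
      by_cases hs : s = ""
      · have hflag : r.2 = true := by
          rw [hf]
          simp only [Bool.false_or, List.any_eq_true]
          exact ⟨l, hl, by rw [h]; simpa using hs⟩
        rw [if_pos hflag]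
        refine (PySem.Set.mem_add _ _ _).2 (Or.inr ?_)
        rw [← hnorm, pvNorm_some l s h, if_pos hs]
      · have hx : x ∈ r.1 := by
          refine hm.2 (Or.inr ⟨l, hl, ?_, ?_⟩)
          · rw [h, ← hnorm, pvNorm_some l s h, if_neg hs]
          · rw [← hnorm, pvNorm_some l s h, if_neg hs]; exact hs
        split
        · exact (PySem.Set.mem_add _ _ _).2 (Or.inl hx)
        · exact hx

-- in a strictly increasing list, an element that bounds the whole list is its last
theorem last_of_max {acc : List String} {v : String}
    (hp : acc.Pairwise (· < ·)) (hmax : ∀ a ∈ acc, a ≤ v) (hv : v ∈ acc) :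
    acc.getLast? = some v := by
  induction acc with
  | nil => cases hv
  | cons a t ih =>
    cases t with
    | nil =>
      have : v = a := by simpa using hv
      subst this; rfl
    | cons b u =>
      rw [List.getLast?_cons_cons]
      rcases List.mem_cons.1 hv with rfl | hv'
      · -- v is the head, but b > v while b ≤ v: contradiction
        have hvb : v < b := (List.pairwise_cons.1 hp).1 b (List.mem_cons_self ..)
        have hbv : b ≤ v := hmax b (List.mem_cons_of_mem _ (List.mem_cons_self ..))
        exact absurd hvb (not_lt.2 hbv)
      · exact ih (List.pairwise_cons.1 hp).2
          (fun a ha => hmax a (List.mem_cons_of_mem _ ha)) hv'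

-- B's scan over a nondecreasing list yields a strictly increasing list with the
-- same members as the accumulator plus the input
theorem dedupe_fold (vals : List String) (acc : List String)
    (hacc : acc.Pairwise (· < ·))
    (hv : vals.Pairwise (· ≤ ·))
    (hle : ∀ a ∈ acc, ∀ w ∈ vals, a ≤ w) :
    (vals.foldl pvDedupStep acc).Pairwise (· < ·) ∧
    (∀ x, x ∈ vals.foldl pvDedupStep acc ↔ x ∈ acc ∨ x ∈ vals) := by
  induction vals generalizing acc with
  | nil => exact ⟨hacc, by simp⟩
  | cons v rest ih =>
    simp only [List.foldl_cons]
    have hvrest := (List.pairwise_cons.1 hv).1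
    have hvtail := (List.pairwise_cons.1 hv).2
    by_cases hap : acc = [] ∨ acc.getLast? ≠ some v
    · -- append branch
      have hstep : pvDedupStep acc v = acc ++ [v] := by
        unfold pvDedupStep
        rcases hap with h | h
        · simp [h]
        · simp [bne_iff_ne, h]
      rw [hstep]
      have hlt : ∀ a ∈ acc, a < v := by
        intro a ha
        have hle' : a ≤ v := hle a ha v (List.mem_cons_self ..)
        rcases lt_or_eq_of_le hle' with h | rfl
        · exact h
        · exact absurd (last_of_max hacc
            (fun b hb => hle b hb a (List.mem_cons_self ..)) ha)
            (by rcases hap with h | h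
                · subst h; cases ha
                · exact h)
      have hacc' : (acc ++ [v]).Pairwise (· < ·) := by
        rw [List.pairwise_append]
        exact ⟨hacc, List.pairwise_singleton _ _, fun a ha b hb => by
          rw [List.mem_singleton.1 hb]; exact hlt a ha⟩
      have hle' : ∀ a ∈ acc ++ [v], ∀ w ∈ rest, a ≤ w := by
        intro a ha w hw
        rcases List.mem_append.1 ha with ha | ha
        · exact hle a ha w (List.mem_cons_of_mem _ hw)
        · rw [List.mem_singleton.1 ha]; exact hvrest w hw
      obtain ⟨h1, h2⟩ := ih (acc ++ [v]) hacc' hvtail hle'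
      refine ⟨h1, fun x => ?_⟩
      rw [h2 x]
      simp only [List.mem_append, List.mem_cons]
      tauto
    · -- skip branch: acc nonempty and already ends with v
      push Not at hap
      obtain ⟨hne, hlast⟩ := hap
      have hstep : pvDedupStep acc v = acc := by
        unfold pvDedupStep
        simp [hne, hlast]
      rw [hstep]
      have hvmem : v ∈ acc := List.mem_of_getLast? hlast
      obtain ⟨h1, h2⟩ := ih acc hacc hvtail
        (fun a ha w hw => hle a ha w (List.mem_cons_of_mem _ hw))
      refine ⟨h1, fun x => ?_⟩
      rw [h2 x]
      simp only [List.mem_cons]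
      constructor
      · rintro (h | h)
        · exact Or.inl h
        · exact Or.inr (Or.inr h)
      · rintro (h | rfl | h)
        · exact Or.inl h
        · exact Or.inl hvmem
        · exact Or.inr h

-- ===== VERDICT (by name: the statement is the Claim_ definition above) =====
theorem get_lead_statuses_spec : Claim_equal_get_lead_statuses := by
  intro leads _
  show get_lead_statuses leads = get_lead_statuses_alt leads
  unfold get_lead_statuses get_lead_statuses_alt
  set vals := PySem.List.sorted (leads.map pvNorm) (fun x => x) false with hvals
  have hvperm : vals.Perm (leads.map pvNorm) := PySem.List.sorted_perm _ _ _
  have hvpair : vals.Pairwise (· ≤ ·) := PySem.List.sorted_pairwise _ _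
  obtain ⟨hBpair, hBmem⟩ := dedupe_fold vals [] (List.Pairwise.nil) hvpair (by simp)
  set B := vals.foldl pvDedupStep [] with hB
  -- B is a permutation of Set.ofList (leads.map pvNorm)
  have hBperm : B.Perm (PySem.Set.ofList (leads.map pvNorm)) := by
    refine (List.perm_ext_iff_of_nodup (hBpair.imp ne_of_lt) (PySem.Set.nodup_ofList _)).2
      fun x => ?_
    rw [hBmem x, PySem.Set.mem_ofList]
    simp only [List.mem_nil_iff, false_or]
    exact ⟨fun h => hvperm.mem_iff.1 h, fun h => hvperm.mem_iff.2 h⟩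
  -- A's sorted set equals B
  have hAperm := final_perm leads
  exact PySem.List.sorted_eq_of_perm_of_pairwise_lt _ B (fun x => x) (hBperm.trans hAperm.symm) hBpair
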